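-- pv_equiv track=rewrite | github.com/k-harada/AtCoder | ABC/ABC291/E.py | solve
-- ===== SOURCE A (Python) =====
-- def solve(n, m, xy_list):
--     g = [[] for _ in range(n + 1)]
--     counts = [0] * (n + 1)
--     for x, y in xy_list:
--         g[x].append(y)
--         counts[y] += 1
--     zeros = []
--     for i in range(1, n + 1):
--         if counts[i] == 0:
--             zeros.append(i)
--
--     res = []
--     for _ in range(n):
--         if len(zeros) != 1:
--             return ["No"]
--         p = zeros.pop()
--         res.append(p)
--         for q in g[p]:
--             counts[q] -= 1
--             if counts[q] == 0:
--                 zeros.append(q)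
--     res_seq = [0] * (n + 1)
--     for i in range(n):
--         res_seq[res[i]] = i + 1
--     return ["Yes", " ".join([str(a) for a in res_seq[1:]])]
-- ===== SOURCE B (Python) =====
-- def solve(n, m, xy_list):
--     # B: one append-only queue with an index cursor -- the processed prefix IS the
--     # topological order; uniqueness of the next vertex is checked by length arithmetic
--     # (exactly one vertex pending <=> len(queue) == i + 1); the 1-based position table
--     # is written in place during the sweep (no separate order list + scatter pass);
--     # g and counts are built in two separate passes.
--     g = [[] for _ in range(n + 1)]
--     for x, y in xy_list:
--         g[x].append(y)
--     counts = [0] * (n + 1)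
--     for x, y in xy_list:
--         counts[y] += 1
--     queue = [i for i in range(1, n + 1) if counts[i] == 0]
--     seq = [0] * (n + 1)
--     for i in range(n):
--         if len(queue) != i + 1:
--             return ["No"]
--         p = queue[i]
--         seq[p] = i + 1
--         for q in g[p]:
--             c = counts[q] - 1
--             counts[q] = c
--             if c == 0:
--                 queue.append(q)
--     return ["Yes", " ".join(map(str, seq[1:]))]
-- ===== Notes on version B (the rewrite author's own statement) =====
-- stated objective: alternative
-- what changed: Same uniqueness-guarded Kahn elimination, different mechanics and decomposition: B keeps one append-only queue with an index cursor whose processed prefix is the order (A pops from and refills a mutable zeros stack), checks uniqueness by length arithmetic (len(queue) == i+1) instead of counting the stack, writes the 1-based position table in place during the sweep instead of collecting res and inverting it in a separate scatter pass, and builds the adjacency lists and indegrees in two separate passes instead of one paired loop.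
import Mathlib
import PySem

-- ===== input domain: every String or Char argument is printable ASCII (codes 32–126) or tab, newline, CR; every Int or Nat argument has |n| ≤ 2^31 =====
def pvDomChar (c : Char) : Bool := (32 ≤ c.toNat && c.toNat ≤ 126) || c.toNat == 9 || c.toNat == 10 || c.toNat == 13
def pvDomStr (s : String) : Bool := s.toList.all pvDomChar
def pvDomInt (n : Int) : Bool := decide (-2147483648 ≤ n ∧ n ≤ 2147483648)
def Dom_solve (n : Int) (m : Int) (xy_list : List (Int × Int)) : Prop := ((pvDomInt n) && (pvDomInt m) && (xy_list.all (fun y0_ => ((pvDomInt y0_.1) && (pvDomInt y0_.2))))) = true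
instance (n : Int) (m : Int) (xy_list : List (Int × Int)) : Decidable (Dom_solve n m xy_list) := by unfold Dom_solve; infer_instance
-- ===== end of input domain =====

-- B runs the same uniqueness-guarded Kahn elimination with different mechanics: one append-only
-- queue with an index cursor (the processed prefix is the order; uniqueness = length arithmetic)
-- instead of A's popped-and-refilled zeros stack, the 1-based position table written in place
-- during the sweep instead of A's collected res plus a second scatter pass, and the adjacency /
-- indegree arrays built in two separate passes instead of one paired loop (objective:
-- alternative, same cost class).

-- ===== PORT A =====
-- A's main loop: for _ in range(n): guard len(zeros)==1, pop last, decrement successors,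
-- collect fresh zeros.  none = A returned ["No"].  List indexing is Python-exact
-- (PySem pyGetD/pySetD: negative indices wrap).
def loopA (g : List (List Int)) : Nat → List Int → List Int → List Int → Option (List Int)
  | 0, _, _, res => some res
  | fuel+1, counts, zeros, res =>
    if zeros.length ≠ 1 then none
    else
      let p := zeros.getLastD 0
      let zs := zeros.dropLast
      let st := (PySem.List.pyGetD g p []).foldl
        (fun (s : List Int × List Int) q =>
          let c' := PySem.List.pySetD s.1 q (PySem.List.pyGetD s.1 q 0 - 1)
          if PySem.List.pyGetD c' q 0 = 0 then (c', s.2 ++ [q]) else (c', s.2))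
        (counts, zs)
      loopA g fuel st.1 st.2 (res ++ [p])

def solve (n : Int) (m : Int) (xy_list : List (Int × Int)) : List String :=
  let nn := n.toNat
  let gc := xy_list.foldl
    (fun (s : List (List Int) × List Int) e =>
      (PySem.List.pySetD s.1 e.1 (PySem.List.pyGetD s.1 e.1 [] ++ [e.2]),
       PySem.List.pySetD s.2 e.2 (PySem.List.pyGetD s.2 e.2 0 + 1)))
    (List.replicate ((n+1).toNat) ([] : List Int), List.replicate ((n+1).toNat) (0 : Int))
  let zeros := (PySem.List.pyRange 1 (n+1) 1).foldl
    (fun z i => if PySem.List.pyGetD gc.2 i 0 = 0 then z ++ [i] else z) []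
  match loopA gc.1 nn gc.2 zeros [] with
  | none => ["No"]
  | some res =>
    let res_seq := (List.range nn).foldl
      (fun s i => PySem.List.pySetD s (res.getD i 0) ((i : Int) + 1))
      (List.replicate ((n+1).toNat) (0 : Int))
    ["Yes", PySem.Str.join " " ((res_seq.drop 1).map PySem.Int.toStr)]

-- ===== PORT B =====
-- B's main loop: for i in range(n): the processed prefix of the append-only queue is the order;
-- guard len(queue) == i+1 (exactly one vertex pending), read p = queue[i], write its position
-- into seq at once, decrement p's successors appending fresh zeros to the same queue.
def loopB (g : List (List Int)) : List Int → List Int → List Int → List Int → Option (List Int)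
  | [], _, _, seq => some seq
  | i :: rest, counts, queue, seq =>
    if (queue.length : Int) ≠ i + 1 then none
    else
      let p := PySem.List.pyGetD queue i 0
      let seq' := PySem.List.pySetD seq p (i + 1)
      let st := (PySem.List.pyGetD g p []).foldl
        (fun (s : List Int × List Int) q =>
          let c := PySem.List.pyGetD s.1 q 0 - 1
          (PySem.List.pySetD s.1 q c, if c = 0 then s.2 ++ [q] else s.2))
        (counts, queue)
      loopB g rest st.1 st.2 seq'

def solve_alt (n : Int) (m : Int) (xy_list : List (Int × Int)) : List String :=
  let g := xy_list.foldl
    (fun g e => PySem.List.pySetD g e.1 (PySem.List.pyGetD g e.1 [] ++ [e.2]))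
    (List.replicate ((n+1).toNat) ([] : List Int))
  let counts := xy_list.foldl
    (fun c e => PySem.List.pySetD c e.2 (PySem.List.pyGetD c e.2 0 + 1))
    (List.replicate ((n+1).toNat) (0 : Int))
  let queue := (PySem.List.pyRange 1 (n+1) 1).filter (fun i => PySem.List.pyGetD counts i 0 == 0)
  let seq := List.replicate ((n+1).toNat) (0 : Int)
  match loopB g (PySem.List.pyRange 0 n 1) counts queue seq with
  | none => ["No"]
  | some s => ["Yes", PySem.Str.join " " ((s.drop 1).map PySem.Int.toStr)]

-- ===== PRECONDITION & SPEC =====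
-- Pre_solve is exactly the no-crash domain of A: every edge endpoint is a valid Python index
-- into the length-(n+1) arrays (negative indices wrap); outside it A raises IndexError.
def Pre_solve (n : Int) (m : Int) (xy_list : List (Int × Int)) : Prop :=
  ∀ e ∈ xy_list, -(n+1) ≤ e.1 ∧ e.1 ≤ n ∧ -(n+1) ≤ e.2 ∧ e.2 ≤ n
instance (n : Int) (m : Int) (xy_list : List (Int × Int)) : Decidable (Pre_solve n m xy_list) := by unfold Pre_solve; infer_instance
def pvWitness_solve : Int × Int × (List (Int × Int)) := (3, 2, [(1, 2), (2, 3)])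

def Spec_solve (n : Int) (m : Int) (xy_list : List (Int × Int)) (out : List String) : Prop := out = solve_alt n m xy_list
instance (n : Int) (m : Int) (xy_list : List (Int × Int)) (out : List String) : Decidable (Spec_solve n m xy_list out) := by unfold Spec_solve; infer_instance

-- ===== CLAIM (what is proved, stated in full; the proofs are below) =====
def Claim_equal_solve : Prop := ∀ (n : Int) (m : Int) (xy_list : List (Int × Int)), Dom_solve n m xy_list → Pre_solve n m xy_list → Spec_solve n m xy_list (solve n m xy_list)

-- ===== LEMMAS AND PROOFS =====

-- A's inner decrement fold (write-then-read shape)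
def stepFold (g : List (List Int)) (p : Int) (counts zs : List Int) : List Int × List Int :=
  (PySem.List.pyGetD g p []).foldl
    (fun (s : List Int × List Int) q =>
      let c' := PySem.List.pySetD s.1 q (PySem.List.pyGetD s.1 q 0 - 1)
      if PySem.List.pyGetD c' q 0 = 0 then (c', s.2 ++ [q]) else (c', s.2))
    (counts, zs)

-- B's inner decrement fold (read-before-write shape)
def stepB (g : List (List Int)) (p : Int) (counts queue : List Int) : List Int × List Int :=
  (PySem.List.pyGetD g p []).foldl
    (fun (s : List Int × List Int) q =>
      let c := PySem.List.pyGetD s.1 q 0 - 1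
      (PySem.List.pySetD s.1 q c, if c = 0 then s.2 ++ [q] else s.2))
    (counts, queue)

-- ---- Python-indexing bridges ----

theorem pyIdx_nonneg (len : Nat) (i : Int) (h1 : 0 ≤ i) (h2 : i < (len:Int)) :
    PySem.List.pyIdx? len i = some i.toNat := by
  unfold PySem.List.pyIdx?
  rw [if_pos h1, if_pos h2]

theorem pyIdx_neg (len : Nat) (i : Int) (h1 : -(len:Int) ≤ i) (h2 : i < 0) :
    PySem.List.pyIdx? len i = some (i + len).toNat := by
  unfold PySem.List.pyIdx?
  rw [if_neg (by omega), if_pos (by omega)]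
  congr 1
  omega

theorem pyGetD_nonneg {α : Type} (xs : List α) (i : Int) (d : α) (h : 0 ≤ i) :
    PySem.List.pyGetD xs i d = xs.getD i.toNat d := by
  obtain ⟨k, rfl⟩ : ∃ k : Nat, i = (k : Int) := ⟨i.toNat, by omega⟩
  simp

-- reading back the slot just written, through Python's negative-index wrap
theorem pyGetD_pySetD_self {α : Type} (xs : List α) (q : Int) (v d : α)
    (h1 : -(xs.length : Int) ≤ q) (h2 : q < (xs.length : Int)) :
    PySem.List.pyGetD (PySem.List.pySetD xs q v) q d = v := by
  have hidx : ∃ j : Nat, PySem.List.pyIdx? xs.length q = some j ∧ j < xs.length := by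
    by_cases h : 0 ≤ q
    · exact ⟨q.toNat, pyIdx_nonneg xs.length q h h2, by omega⟩
    · exact ⟨(q + xs.length).toNat, pyIdx_neg xs.length q h1 (by omega), by omega⟩
  obtain ⟨j, hj, hjlt⟩ := hidx
  have hset : PySem.List.pySetD xs q v = xs.set j v := by
    unfold PySem.List.pySetD PySem.List.pySet?
    rw [hj]
    rfl
  rw [hset]
  unfold PySem.List.pyGetD PySem.List.pyGet?
  rw [List.length_set, hj]
  simp [List.getElem?_set, hjlt]

theorem mem_pySetD {α : Type} (xs : List α) (i : Int) (v y : α)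
    (h : y ∈ PySem.List.pySetD xs i v) : y = v ∨ y ∈ xs := by
  unfold PySem.List.pySetD PySem.List.pySet? at h
  cases hidx : PySem.List.pyIdx? xs.length i with
  | none => rw [hidx] at h; exact Or.inr h
  | some j =>
    rw [hidx] at h
    simp only [Option.map_some, Option.getD_some] at h
    rcases List.mem_or_eq_of_mem_set h with h' | h'
    · exact Or.inr h'
    · exact Or.inl h'

theorem pyGetD_mem_or_default {α : Type} (xs : List α) (i : Int) (d : α) :
    PySem.List.pyGetD xs i d = d ∨ PySem.List.pyGetD xs i d ∈ xs := by
  unfold PySem.List.pyGetD PySem.List.pyGet?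
  cases hidx : PySem.List.pyIdx? xs.length i with
  | none => exact Or.inl rfl
  | some j =>
    cases hj : xs[j]? with
    | none => left; simp [hj]
    | some a =>
      right
      simp only [Option.bind_some, hj, Option.getD_some]
      exact List.mem_of_getElem? hj

-- ---- the two inner folds agree and preserve the counts length ----

theorem innerBA (L : Nat) :
    ∀ (qs counts acc : List Int), counts.length = L →
    (∀ q ∈ qs, -(L : Int) ≤ q ∧ q < (L : Int)) →
    qs.foldl
      (fun (s : List Int × List Int) q =>
        let c := PySem.List.pyGetD s.1 q 0 - 1
        (PySem.List.pySetD s.1 q c, if c = 0 then s.2 ++ [q] else s.2))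
      (counts, acc) =
    qs.foldl
      (fun (s : List Int × List Int) q =>
        let c' := PySem.List.pySetD s.1 q (PySem.List.pyGetD s.1 q 0 - 1)
        if PySem.List.pyGetD c' q 0 = 0 then (c', s.2 ++ [q]) else (c', s.2))
      (counts, acc) := by
  intro qs
  induction qs with
  | nil => intro counts acc _ _; rfl
  | cons q rest ih =>
    intro counts acc hlen hq
    obtain ⟨hq1, hq2⟩ := hq q List.mem_cons_self
    rw [List.foldl_cons, List.foldl_cons]
    simp only []
    rw [pyGetD_pySetD_self counts q _ 0 (by omega) (by omega)]
    have hlen' : (PySem.List.pySetD counts q (PySem.List.pyGetD counts q 0 - 1)).length = L := by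
      rw [PySem.List.length_pySetD]; exact hlen
    have hq' : ∀ x ∈ rest, -(L : Int) ≤ x ∧ x < (L : Int) :=
      fun x hx => hq x (List.mem_cons_of_mem q hx)
    by_cases h0 : PySem.List.pyGetD counts q 0 - 1 = 0
    · rw [if_pos h0, if_pos h0]
      exact ih _ _ hlen' hq'
    · rw [if_neg h0, if_neg h0]
      exact ih _ _ hlen' hq'

theorem stepB_eq_stepFold (g : List (List Int)) (p : Int) (counts queue : List Int) (L : Nat)
    (hlen : counts.length = L)
    (hq : ∀ q ∈ PySem.List.pyGetD g p [], -(L : Int) ≤ q ∧ q < (L : Int)) :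
    stepB g p counts queue = stepFold g p counts queue := by
  unfold stepB stepFold
  exact innerBA L _ counts queue hlen hq

theorem foldA_fst_length :
    ∀ (qs counts acc : List Int),
    ((qs.foldl
      (fun (s : List Int × List Int) q =>
        let c' := PySem.List.pySetD s.1 q (PySem.List.pyGetD s.1 q 0 - 1)
        if PySem.List.pyGetD c' q 0 = 0 then (c', s.2 ++ [q]) else (c', s.2))
      (counts, acc)).1).length = counts.length := by
  intro qs
  induction qs with
  | nil => intro counts acc; rfl
  | cons q rest ih =>
    intro counts acc
    rw [List.foldl_cons]
    simp only []
    by_cases h0 : PySem.List.pyGetD (PySem.List.pySetD counts q (PySem.List.pyGetD counts q 0 - 1)) q 0 = 0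
    · rw [if_pos h0, ih, PySem.List.length_pySetD]
    · rw [if_neg h0, ih, PySem.List.length_pySetD]

theorem stepFold_fst_length (g : List (List Int)) (p : Int) (counts zs : List Int) :
    (stepFold g p counts zs).1.length = counts.length :=
  foldA_fst_length _ counts zs

-- appending to the accumulator list commutes with running A's inner fold
theorem foldA_shift (g : List (List Int)) (p : Int) :
    ∀ (qs counts u v : List Int),
    qs.foldl
      (fun (s : List Int × List Int) q =>
        let c' := PySem.List.pySetD s.1 q (PySem.List.pyGetD s.1 q 0 - 1)
        if PySem.List.pyGetD c' q 0 = 0 then (c', s.2 ++ [q]) else (c', s.2))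
      (counts, u ++ v) =
    ((qs.foldl
      (fun (s : List Int × List Int) q =>
        let c' := PySem.List.pySetD s.1 q (PySem.List.pyGetD s.1 q 0 - 1)
        if PySem.List.pyGetD c' q 0 = 0 then (c', s.2 ++ [q]) else (c', s.2))
      (counts, v)).1,
     u ++ (qs.foldl
      (fun (s : List Int × List Int) q =>
        let c' := PySem.List.pySetD s.1 q (PySem.List.pyGetD s.1 q 0 - 1)
        if PySem.List.pyGetD c' q 0 = 0 then (c', s.2 ++ [q]) else (c', s.2))
      (counts, v)).2) := by
  intro qs
  induction qs with
  | nil => intro counts u v; rfl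
  | cons q rest ih =>
    intro counts u v
    rw [List.foldl_cons, List.foldl_cons]
    simp only []
    by_cases h0 : PySem.List.pyGetD (PySem.List.pySetD counts q (PySem.List.pyGetD counts q 0 - 1)) q 0 = 0
    · rw [if_pos h0, if_pos h0]
      rw [List.append_assoc]
      exact ih _ u (v ++ [q])
    · rw [if_neg h0, if_neg h0]
      exact ih _ u v

theorem stepFold_shift (g : List (List Int)) (p : Int) (counts queue : List Int) :
    stepFold g p counts queue =
      ((stepFold g p counts []).1, queue ++ (stepFold g p counts []).2) := by
  have h := foldA_shift g p (PySem.List.pyGetD g p []) counts queue []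
  simpa [stepFold] using h

-- ---- loop unfolding and shape of A's loop ----

theorem loopA_succ (g : List (List Int)) (fuel : Nat) (counts zeros res : List Int) :
    loopA g (fuel+1) counts zeros res =
      if zeros.length ≠ 1 then none
      else loopA g fuel (stepFold g (zeros.getLastD 0) counts zeros.dropLast).1
        (stepFold g (zeros.getLastD 0) counts zeros.dropLast).2 (res ++ [zeros.getLastD 0]) := rfl

theorem loopB_cons (g : List (List Int)) (i : Int) (rest counts queue seq : List Int) :
    loopB g (i :: rest) counts queue seq =
      if (queue.length : Int) ≠ i + 1 then none
      else loopB g rest (stepB g (PySem.List.pyGetD queue i 0) counts queue).1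
        (stepB g (PySem.List.pyGetD queue i 0) counts queue).2
        (PySem.List.pySetD seq (PySem.List.pyGetD queue i 0) (i + 1)) := rfl

theorem loopA_some_prefix (g : List (List Int)) :
    ∀ (fuel : Nat) (counts zeros res out : List Int),
    loopA g fuel counts zeros res = some out → ∃ t, out = res ++ t := by
  intro fuel
  induction fuel with
  | zero =>
    intro counts zeros res out h
    have : res = out := by simpa [loopA] using h
    exact ⟨[], by simp [this]⟩
  | succ f ih =>
    intro counts zeros res out h
    rw [loopA_succ] at h
    by_cases hg : zeros.length ≠ 1
    · rw [if_pos hg] at h; cases h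
    · rw [if_neg hg] at h
      obtain ⟨t, ht⟩ := ih _ _ _ _ h
      exact ⟨zeros.getLastD 0 :: t, by rw [ht]; simp⟩

theorem getD_append_len (l t : List Int) (a : Int) : (l ++ a :: t).getD l.length 0 = a := by
  simp [List.getD]

-- ---- initial state: builds and the zeros list ----

-- a fold of paired, componentwise updates splits into two independent folds (B builds g and
-- counts in two separate passes; A builds them together)
theorem foldl_pair_split (xy : List (Int × Int))
    (F : List (List Int) → (Int × Int) → List (List Int))
    (G : List Int → (Int × Int) → List Int) :
    ∀ (g0 : List (List Int)) (c0 : List Int),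
    xy.foldl (fun (s : List (List Int) × List Int) e => (F s.1 e, G s.2 e)) (g0, c0) =
      (xy.foldl F g0, xy.foldl G c0) := by
  induction xy with
  | nil => intro g0 c0; rfl
  | cons e rest ih =>
    intro g0 c0
    rw [List.foldl_cons, List.foldl_cons, List.foldl_cons]
    exact ih (F g0 e) (G c0 e)

theorem zerosA_eq_filter (n : Int) (counts : List Int) :
    (PySem.List.pyRange 1 (n+1) 1).foldl
      (fun z i => if PySem.List.pyGetD counts i 0 = 0 then z ++ [i] else z) [] =
    (PySem.List.pyRange 1 (n+1) 1).filter (fun i => PySem.List.pyGetD counts i 0 == 0) := by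
  rw [PySem.List.foldl_append_ite_eq_filter]
  simp only [List.nil_append]
  apply List.filter_congr
  intro x _
  rw [Bool.eq_iff_iff]; simp

-- every value stored in an adjacency list of the build fold satisfies C if every edge target does
theorem build_g_entries (C : Int → Prop) :
    ∀ (xy : List (Int × Int)) (g0 : List (List Int)),
    (∀ l ∈ g0, ∀ q ∈ l, C q) → (∀ e ∈ xy, C e.2) →
    ∀ l ∈ xy.foldl
      (fun g e => PySem.List.pySetD g e.1 (PySem.List.pyGetD g e.1 [] ++ [e.2])) g0,
    ∀ q ∈ l, C q := by
  intro xy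
  induction xy with
  | nil => intro g0 h0 _ l hl; exact h0 l hl
  | cons e rest ih =>
    intro g0 h0 hxy
    rw [List.foldl_cons]
    apply ih
    · intro l hl q hq
      rcases mem_pySetD _ _ _ _ hl with h | h
      · subst h
        rcases List.mem_append.mp hq with h' | h'
        · rcases pyGetD_mem_or_default g0 e.1 [] with hd | hd
          · rw [hd] at h'; cases h'
          · exact h0 _ hd q h'
        · rw [List.mem_singleton] at h'
          subst h'
          exact hxy e List.mem_cons_self
      · exact h0 l h q hq
    · intro e' he'
      exact hxy e' (List.mem_cons_of_mem e he')

theorem build_c_length :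
    ∀ (xy : List (Int × Int)) (c0 : List Int),
    (xy.foldl (fun c e => PySem.List.pySetD c e.2 (PySem.List.pyGetD c e.2 0 + 1)) c0).length
      = c0.length := by
  intro xy
  induction xy with
  | nil => intro c0; rfl
  | cons e rest ih =>
    intro c0
    rw [List.foldl_cons, ih, PySem.List.length_pySetD]

-- ---- the main correspondence: B's cursor sweep simulates A's guarded loop and writes
-- ---- A's scatter assignments as it goes ----

theorem AB (g : List (List Int)) (L : Nat) (n : Int)
    (Hg : ∀ l ∈ g, ∀ q ∈ l, -(L : Int) ≤ q ∧ q < (L : Int)) :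
    ∀ (k : Nat) (counts zeros res seq : List Int),
    counts.length = L →
    (res.length : Int) + (k : Int) = n →
    loopB g (PySem.List.pyRange (res.length : Int) n 1) counts (res ++ zeros) seq =
      (loopA g k counts zeros res).map
        (fun out => (List.range' res.length k).foldl
          (fun (s : List Int) (j : Nat) => PySem.List.pySetD s (out.getD j 0) ((j : Int) + 1)) seq) := by
  intro k
  induction k with
  | zero =>
    intro counts zeros res seq hcl hk
    rw [PySem.List.pyRange_one_eq_nil (by omega)]
    rfl
  | succ k ih =>
    intro counts zeros res seq hcl hk
    have hlt : (res.length : Int) < n := by omega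
    rw [PySem.List.pyRange_one_cons hlt, loopB_cons, loopA_succ]
    by_cases hg1 : zeros.length ≠ 1
    · rw [if_pos (by
        simp only [List.length_append]
        omega : ((res ++ zeros).length : Int) ≠ (res.length : Int) + 1)]
      rw [if_pos hg1]
      rfl
    · push_neg at hg1
      obtain ⟨a, hzp⟩ := List.length_eq_one_iff.mp hg1
      subst hzp
      rw [if_neg (by
        simp only [List.length_append, List.length_cons, List.length_nil]
        omega : ¬ ((res ++ [a]).length : Int) ≠ (res.length : Int) + 1)]
      rw [if_neg (by simp)]
      have hlast : ([a] : List Int).getLastD 0 = a := rfl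
      have hdrop : ([a] : List Int).dropLast = [] := rfl
      rw [hlast, hdrop]
      have hp : PySem.List.pyGetD (res ++ [a]) (res.length : Int) 0 = a := by
        rw [pyGetD_nonneg _ _ _ (by omega)]
        have : ((res.length : Int)).toNat = res.length := Int.toNat_natCast res.length
        rw [this]
        exact getD_append_len res [] a
      rw [hp]
      have hqrange : ∀ q ∈ PySem.List.pyGetD g a [], -(L : Int) ≤ q ∧ q < (L : Int) := by
        intro q hq
        rcases pyGetD_mem_or_default g a [] with hd | hd
        · rw [hd] at hq; cases hq
        · exact Hg _ hd q hq
      set T := stepFold g a counts [] with hT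
      have hstep : stepB g a counts (res ++ [a]) = (T.1, (res ++ [a]) ++ T.2) := by
        rw [stepB_eq_stepFold g a counts (res ++ [a]) L hcl hqrange, hT]
        exact stepFold_shift g a counts (res ++ [a])
      have hst1 : (stepB g a counts (res ++ [a])).1 = T.1 := by rw [hstep]
      have hst2 : (stepB g a counts (res ++ [a])).2 = (res ++ [a]) ++ T.2 := by rw [hstep]
      rw [hst1, hst2]
      have hcl' : T.1.length = L := by
        rw [hT, stepFold_fst_length]; exact hcl
      have hk' : (((res ++ [a]).length : Int)) + (k : Int) = n := by
        simp only [List.length_append, List.length_cons, List.length_nil]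
        push_cast
        omega
      have hidx : (res.length : Int) + 1 = (((res ++ [a]).length : Int)) := by
        simp only [List.length_append, List.length_cons, List.length_nil]
        push_cast
        omega
      have hih := ih T.1 T.2 (res ++ [a]) (PySem.List.pySetD seq a ((res.length : Int) + 1)) hcl' hk'
      rw [← hidx] at hih
      rw [hih]
      cases hA : loopA g k T.1 T.2 (res ++ [a]) with
      | none => rfl
      | some out =>
        obtain ⟨t, ht⟩ := loopA_some_prefix g k T.1 T.2 (res ++ [a]) out hA
        have hout : out.getD res.length 0 = a := by
          rw [ht, List.append_assoc, List.singleton_append]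
          exact getD_append_len res (t) a
        simp only [Option.map_some, Option.some.injEq]
        rw [List.range'_succ, List.foldl_cons]
        simp only [List.length_append, List.length_cons, List.length_nil, hout]

-- ===== VERDICT (by name: the statement is the Claim_ definition above) =====
theorem solve_spec : Claim_equal_solve := by
  intro n m xy hdom hpre
  unfold Spec_solve
  unfold solve solve_alt
  simp only []
  set L := (n + 1).toNat with hL
  set gc := xy.foldl
    (fun (s : List (List Int) × List Int) e =>
      (PySem.List.pySetD s.1 e.1 (PySem.List.pyGetD s.1 e.1 [] ++ [e.2]),
       PySem.List.pySetD s.2 e.2 (PySem.List.pyGetD s.2 e.2 0 + 1)))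
    (List.replicate L ([] : List Int), List.replicate L (0 : Int)) with hgc
  have hsplit := foldl_pair_split xy
    (fun g e => PySem.List.pySetD g e.1 (PySem.List.pyGetD g e.1 [] ++ [e.2]))
    (fun c e => PySem.List.pySetD c e.2 (PySem.List.pyGetD c e.2 0 + 1))
    (List.replicate L ([] : List Int)) (List.replicate L (0 : Int))
  have hg1 : xy.foldl
      (fun g e => PySem.List.pySetD g e.1 (PySem.List.pyGetD g e.1 [] ++ [e.2]))
      (List.replicate L ([] : List Int)) = gc.1 := by
    rw [hgc, hsplit]
  have hg2 : xy.foldl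
      (fun c e => PySem.List.pySetD c e.2 (PySem.List.pyGetD c e.2 0 + 1))
      (List.replicate L (0 : Int)) = gc.2 := by
    rw [hgc, hsplit]
  rw [hg1, hg2]
  rw [zerosA_eq_filter n gc.2]
  set zs := List.filter (fun i => PySem.List.pyGetD gc.2 i 0 == 0) (PySem.List.pyRange 1 (n+1) 1) with hzs
  have hclen : gc.2.length = L := by
    rw [← hg2, build_c_length, List.length_replicate]
  have hLcast : (L : Int) = if 0 ≤ n + 1 then n + 1 else 0 := by
    rw [hL]; split <;> omega
  have Hg : ∀ l ∈ gc.1, ∀ q ∈ l, -(L : Int) ≤ q ∧ q < (L : Int) := by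
    rw [← hg1]
    apply build_g_entries (fun q => -(L : Int) ≤ q ∧ q < (L : Int)) xy
      (List.replicate L ([] : List Int))
    · intro l hl
      have : l = ([] : List Int) := List.eq_of_mem_replicate hl
      subst this
      intro q hq
      cases hq
    · intro e he
      have := hpre e he
      constructor <;> omega
  by_cases hn : n < 0
  · -- n < 0: both loops are empty; both emit ["Yes", ""] over the empty position table
    have hnn : n.toNat = 0 := by omega
    rw [hnn, PySem.List.pyRange_one_eq_nil (by omega : n ≤ 0)]
    rfl
  · push_neg at hn
    have hAB := AB gc.1 L n Hg n.toNat gc.2 zs [] (List.replicate L (0 : Int)) hclen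
      (by simp only [List.length_nil, Nat.cast_zero]; omega)
    simp only [List.length_nil, Nat.cast_zero, List.nil_append] at hAB
    rw [hAB]
    cases hA : loopA gc.1 n.toNat gc.2 zs [] with
    | none => rfl
    | some res =>
      simp only [Option.map_some]
      rw [List.range_eq_range']
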